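-- pv_equiv track=rewrite | github.com/adolgert/anisotropic_hilbert | src/find_alternative_paths.py | analyze_path
-- ===== SOURCE A (Python) =====
-- def gray_code(w):
--     """Standard binary-reflected Gray code."""
--     return w ^ (w >> 1)
--
-- def rotl_bits(x, r, k):
--     """Rotate left by r bits in k-bit space."""
--     if k == 0:
--         return x
--     r = r % k
--     if r == 0:
--         return x
--     mask = (1 << k) - 1
--     return ((x << r) | (x >> (k - r))) & mask
--
-- def compute_brgc_sequence(k):
--     """Compute the rotated BRGC sequence and step directions for k dimensions."""
--     n = 1 << k  # 2^k subcubes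
--     h = []
--     d = []
--
--     for w in range(n):
--         g = gray_code(w)
--         h_w = rotl_bits(g, 1, k)
--         h.append(h_w)
--
--     # Compute directions (which axis changes)
--     for w in range(n - 1):
--         diff = h[w] ^ h[w + 1]
--         # Find which bit is set
--         axis = 0
--         while axis < k and ((diff >> axis) & 1) == 0:
--             axis += 1
--         d.append(axis)
--
--     return h, d
--
-- def analyze_path(path, k):
--     """Analyze a path and compute child_entry and child_dir."""
--     h, d = compute_brgc_sequence(k)
--     n = len(path)
--
--     entry = []
--     direction = []
--
--     for w in range(n):
--         # ℓ^{in}_w = h_w ⊕ s_w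
--         ell_w = h[w] ^ path[w]
--         entry.append(ell_w)
--
--         if w < n - 1:
--             # a_w = axis that changes from s_w to s_{w+1}
--             diff = path[w] ^ path[w + 1]
--             axis = 0
--             while axis < k and ((diff >> axis) & 1) == 0:
--                 axis += 1
--             direction.append(axis)
--
--     return entry, direction
-- ===== SOURCE B (Python) =====
-- def rotl_bits(x, r, k):
--     """Rotate left by r bits in k-bit space."""
--     if k == 0:
--         return x
--     r = r % k
--     if r == 0:
--         return x
--     mask = (1 << k) - 1
--     return ((x << r) | (x >> (k - r))) & mask
--
-- def analyze_path(path, k):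
--     """Analyze a path: single pass, incremental Gray code, no 2^k table."""
--     n = len(path)
--     entry = []
--     direction = []
--     g = 0  # gray(0)
--     for w in range(n):
--         entry.append(rotl_bits(g, 1, k) ^ path[w])
--         if w < n - 1:
--             m = (path[w] ^ path[w + 1]) % (1 << k)  # low k bits of the change
--             if m == 0:
--                 direction.append(k)
--             else:
--                 axis = 0
--                 while m % 2 == 0:
--                     m //= 2
--                     axis += 1
--                 direction.append(axis)
--         t = w + 1
--         g ^= t ^ (t & (t - 1))  # advance: gray(w) -> gray(w+1)
--     return entry, direction
-- ===== Notes on version B (the rewrite author's own statement) =====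
-- stated objective: faster
-- what changed: B drops A's precomputed 2^k-entry Gray-code table (and its unused direction table): it walks the path once, maintaining the Gray code of the index incrementally via g ^= lowbit(w+1), and reads each direction as the count of trailing zeros of the low k bits of path[w]^path[w+1]; intended as faster, though the probe could not confirm a ratio (A timed out at larger sizes while B returned).
import Mathlib
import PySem

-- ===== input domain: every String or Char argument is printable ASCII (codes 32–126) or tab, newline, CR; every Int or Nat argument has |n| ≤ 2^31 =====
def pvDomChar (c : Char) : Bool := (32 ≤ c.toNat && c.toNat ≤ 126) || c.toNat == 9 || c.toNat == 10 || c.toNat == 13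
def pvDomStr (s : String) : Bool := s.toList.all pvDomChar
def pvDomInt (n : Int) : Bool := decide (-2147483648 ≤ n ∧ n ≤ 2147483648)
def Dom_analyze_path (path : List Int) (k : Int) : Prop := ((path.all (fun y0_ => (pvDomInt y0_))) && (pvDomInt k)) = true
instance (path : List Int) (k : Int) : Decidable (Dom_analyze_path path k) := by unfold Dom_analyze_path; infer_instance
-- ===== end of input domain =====

-- B replaces A's precomputed 2^k Gray-code table by an incrementally maintained Gray value
-- and reads each direction off the low bits of the step difference; intended as faster
-- (no 2^k table); a timing run could not confirm a ratio (A timed out at larger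
-- sizes while B returned), so no measured speed-up is claimed here.

-- ===== PORT A =====
def grayCode (w : Int) : Int := PySem.Int.bxor w (w >>> (1:Nat))

-- Python raises on a negative shift amount; '.toNat' is only reached with nonneg shifts inside Pre_.
def rotlBits (x r k : Int) : Int :=
  if k = 0 then x
  else
    let r' := PySem.Int.mod r k
    if r' = 0 then x
    else
      let mask : Int := ((1:Int) <<< k.toNat) - 1
      PySem.Int.band (PySem.Int.bor (x <<< r'.toNat) (x >>> (k - r').toNat)) mask

-- A's inner 'while axis < k and ((diff >> axis) & 1) == 0: axis += 1' loop.
def findAxis (diff k axis : Int) : Int :=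
  if h : axis < k ∧ PySem.Int.band (diff >>> axis.toNat) 1 = 0 then findAxis diff k (axis + 1)
  else axis
termination_by (k - axis).toNat
decreasing_by omega

-- 'h[w]' raises IndexError out of range (Python); pyGetD default is only reached outside Pre_.
def computeBrgcSequence (k : Int) : List Int × List Int :=
  let n : Int := (1:Int) <<< k.toNat
  let h := (PySem.List.pyRange 0 n).foldl (fun acc w => acc ++ [rotlBits (grayCode w) 1 k]) []
  let d := (PySem.List.pyRange 0 (n-1)).foldl (fun acc w =>
      acc ++ [findAxis (PySem.Int.bxor (PySem.List.pyGetD h w 0) (PySem.List.pyGetD h (w+1) 0)) k 0]) []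
  (h, d)

def analyze_path (path : List Int) (k : Int) : List Int × List Int :=
  let hd := computeBrgcSequence k
  let h := hd.1
  let n : Int := path.length
  (PySem.List.pyRange 0 n).foldl (fun (st : List Int × List Int) w =>
    (st.1 ++ [PySem.Int.bxor (PySem.List.pyGetD h w 0) (PySem.List.pyGetD path w 0)],
     if w < n - 1 then
       st.2 ++ [findAxis (PySem.Int.bxor (PySem.List.pyGetD path w 0) (PySem.List.pyGetD path (w+1) 0)) k 0]
     else st.2)) ([], [])

-- ===== PORT B =====
-- B's inner 'while m % 2 == 0: m //= 2; axis += 1' loop; m > 0 at every entry in Source B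
-- (the m ≠ 0 guard only totalizes the function).
def lowAxisLoop (m : Nat) (axis : Int) : Int :=
  if h : m % 2 = 0 ∧ m ≠ 0 then lowAxisLoop (m / 2) (axis + 1) else axis
termination_by m
decreasing_by omega

-- Source B's m = diff % (1 << k) is nonnegative (positive modulus), so 'm.toNat' is exact.
def analyze_path_alt (path : List Int) (k : Int) : List Int × List Int :=
  let n : Int := path.length
  ((PySem.List.pyRange 0 n).foldl (fun (st : (List Int × List Int) × Int) w =>
    let g := st.2
    let e := st.1.1 ++ [PySem.Int.bxor (rotlBits g 1 k) (PySem.List.pyGetD path w 0)]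
    let dir := if w < n - 1 then
        let m := PySem.Int.mod
          (PySem.Int.bxor (PySem.List.pyGetD path w 0) (PySem.List.pyGetD path (w+1) 0))
          ((1:Int) <<< k.toNat)
        st.1.2 ++ [if m = 0 then k else lowAxisLoop m.toNat 0]
      else st.1.2
    let t := w + 1
    ((e, dir), PySem.Int.bxor g (PySem.Int.bxor t (PySem.Int.band t (t - 1))))) (([], []), 0)).1

-- ===== PRECONDITION & SPEC =====
-- Pre_ excludes exactly the inputs where A raises: k < 0 (ValueError from '1 << k') and
-- len(path) > 2^k (IndexError from 'h[w]').
def Pre_analyze_path (path : List Int) (k : Int) : Prop :=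
  0 ≤ k ∧ path.length ≤ 2 ^ k.toNat
instance (path : List Int) (k : Int) : Decidable (Pre_analyze_path path k) := by
  unfold Pre_analyze_path; infer_instance

def pvWitness_analyze_path : List Int × Int := ([0, 1, 3, 2], 2)

def Spec_analyze_path (path : List Int) (k : Int) (out : List Int × List Int) : Prop :=
  out = analyze_path_alt path k
instance (path : List Int) (k : Int) (out : List Int × List Int) :
    Decidable (Spec_analyze_path path k out) := by unfold Spec_analyze_path; infer_instance

-- ===== CLAIM (what is proved, stated in full; the proofs are below) =====
def Claim_equal_analyze_path : Prop := ∀ (path : List Int) (k : Int), Dom_analyze_path path k → Pre_analyze_path path k → Spec_analyze_path path k (analyze_path path k)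

-- ===== LEMMAS AND PROOFS =====

theorem oneShl (K : Nat) : ((1:Int) <<< K) = ((2^K : Nat) : Int) := by
  simp [Int.shiftLeft_eq]
theorem castShr (m : Nat) : ((m:Int) >>> (1:Nat)) = ((m >>> 1 : Nat) : Int) := by
  simp [Int.shiftRight_eq_div_pow, Nat.shiftRight_eq_div_pow]
theorem grayCast (w : Nat) : grayCode (w:Int) = ((w ^^^ (w >>> 1) : Nat) : Int) := by
  unfold grayCode
  rw [castShr, PySem.Int.bxor_natCast]
theorem h_table (k : Int) (w : Nat) (hw : w < 2 ^ k.toNat) :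
    PySem.List.pyGetD (computeBrgcSequence k).1 (w:Int) 0 = rotlBits (grayCode (w:Int)) 1 k := by
  unfold computeBrgcSequence
  simp only [oneShl, PySem.List.pyRange_zero_natCast, PySem.List.foldl_append_singleton_eq_map,
    List.nil_append, List.map_map, PySem.List.pyGetD_natCast]
  simp [List.getD, hw]


theorem lowAxis_shift (m : Nat) : ∀ a : Int, lowAxisLoop m (a+1) = lowAxisLoop m a + 1 := by
  induction m using Nat.strong_induction_on with
  | _ m ih =>
    intro a
    conv_lhs => rw [lowAxisLoop]
    conv_rhs => rw [lowAxisLoop]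
    split_ifs with h
    · rw [ih (m/2) (by omega) (a+1)]
    · rfl

theorem findAxis_shift (K : Nat) : ∀ (f a : Nat) (diff : Int), K - a ≤ f →
    findAxis diff ((K:Int)+1) ((a:Int)+1) = findAxis (diff >>> (1:Nat)) (K:Int) (a:Int) + 1 := by
  intro f
  induction f with
  | zero =>
    intro a diff hf
    -- a ≥ K : both guards false
    conv_lhs => rw [findAxis]
    conv_rhs => rw [findAxis]
    have h1 : ¬ ((a:Int)+1 < (K:Int)+1 ∧ PySem.Int.band (diff >>> ((a:Int)+1).toNat) 1 = 0) := by
      rintro ⟨h, -⟩; omega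
    have h2 : ¬ ((a:Int) < (K:Int) ∧ PySem.Int.band ((diff >>> (1:Nat)) >>> ((a:Int)).toNat) 1 = 0) := by
      rintro ⟨h, -⟩; omega
    rw [dif_neg h1, dif_neg h2]
  | succ f ihf =>
    intro a diff hf
    have hsh : diff >>> ((a:Int)+1).toNat = (diff >>> (1:Nat)) >>> ((a:Int)).toNat := by
      rw [show ((a:Int)+1).toNat = 1 + ((a:Int)).toNat by omega, Int.shiftRight_add]
    conv_lhs => rw [findAxis]
    conv_rhs => rw [findAxis]
    by_cases hg : (a:Int) < (K:Int) ∧ PySem.Int.band ((diff >>> (1:Nat)) >>> ((a:Int)).toNat) 1 = 0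
    · have hg' : (a:Int)+1 < (K:Int)+1 ∧ PySem.Int.band (diff >>> ((a:Int)+1).toNat) 1 = 0 := by
        refine ⟨by omega, ?_⟩; rw [hsh]; exact hg.2
      rw [dif_pos hg', dif_pos hg]
      have := ihf (a+1) diff (by omega)
      push_cast at this ⊢
      rw [show ((a:Int)+1+1) = ((a:Int)+1)+1 by ring] at this ⊢
      exact this
    · have hg' : ¬ ((a:Int)+1 < (K:Int)+1 ∧ PySem.Int.band (diff >>> ((a:Int)+1).toNat) 1 = 0) := by
        rintro ⟨hlt, hb⟩; exact hg ⟨by omega, by rw [← hsh]; exact hb⟩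
      rw [dif_neg hg', dif_neg hg]

theorem modHalf (diff M2 : Int) (h2 : 0 < M2) :
    (diff >>> (1:Nat)) % M2 = (diff % (2*M2)) / 2 := by
  have hM : (0:Int) < 2*M2 := by omega
  have hdm : 2*M2 * (diff / (2*M2)) + diff % (2*M2) = diff := Int.mul_ediv_add_emod diff (2*M2)
  set q := diff / (2*M2) with hq
  set m := diff % (2*M2) with hm
  have hm0 : 0 ≤ m := Int.emod_nonneg diff (by omega)
  have hmlt : m < 2*M2 := Int.emod_lt_of_pos diff hM
  have hdiff : diff = m + 2*(M2*q) := by rw [← hdm]; ring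
  have hshr : diff >>> (1:Nat) = diff / 2 := by
    rw [Int.shiftRight_eq_div_pow]; norm_num
  rw [hshr, hdiff, Int.add_mul_ediv_left m (M2*q) (by norm_num : (2:Int) ≠ 0)]
  have : (m / 2 + M2 * q) % M2 = (m/2) % M2 := Int.add_mul_emod_self_left _ _ _
  rw [this, Int.emod_eq_of_lt (by omega) (by omega)]

theorem axis_eq (K : Nat) : ∀ diff : Int,
    findAxis diff (K:Int) 0 =
      (if PySem.Int.mod diff ((1:Int) <<< K) = 0 then (K:Int)
       else lowAxisLoop (PySem.Int.mod diff ((1:Int) <<< K)).toNat 0) := by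
  induction K with
  | zero =>
    intro diff
    have hm : PySem.Int.mod diff ((1:Int) <<< (0:Nat)) = 0 := by
      rw [show ((1:Int) <<< (0:Nat)) = 1 by decide,
        PySem.Int.mod_eq_emod_of_pos (by norm_num)]
      exact Int.emod_one diff
    rw [hm]
    conv_lhs => rw [findAxis]
    norm_num
  | succ K ih =>
    intro diff
    have hMpos : (0:Int) < (1:Int) <<< (K+1) := by rw [oneShl]; positivity
    have hM2pos : (0:Int) < (1:Int) <<< K := by rw [oneShl]; positivity
    have hMM : ((1:Int) <<< (K+1)) = 2 * ((1:Int) <<< K) := by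
      rw [oneShl, oneShl, pow_succ]; push_cast; ring
    rw [PySem.Int.mod_eq_emod_of_pos hMpos]
    set m := diff % ((1:Int) <<< (K+1)) with hmdef
    have hm0 : 0 ≤ m := Int.emod_nonneg diff (by omega)
    have hmlt : m < 2 * ((1:Int) <<< K) := by rw [hmdef, ← hMM]; exact Int.emod_lt_of_pos diff hMpos
    have hpar : m % 2 = diff % 2 := by
      rw [hmdef]
      exact Int.emod_emod_of_dvd diff (by rw [hMM]; exact Dvd.intro _ rfl)
    have hband : PySem.Int.band (diff >>> ((0:Int)).toNat) 1 = diff % 2 := by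
      rw [show ((0:Int)).toNat = 0 by decide, Int.shiftRight_zero, PySem.Int.band_one,
        PySem.Int.mod_eq_emod_of_pos (by norm_num)]
    rcases Int.emod_two_eq_zero_or_one diff with hpd | hpd
    · -- even: loop advances
      conv_lhs => rw [findAxis]
      rw [dif_pos ⟨by positivity, by rw [hband, hpd]⟩]
      have hsh := findAxis_shift K K 0 diff (by omega)
      push_cast at hsh
      push_cast
      rw [hsh, ih (diff >>> (1:Nat))]
      rw [PySem.Int.mod_eq_emod_of_pos hM2pos, modHalf diff _ hM2pos, ← hMM, ← hmdef]
      by_cases hz : m = 0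
      · rw [hz]
        norm_num
      · have hmeven : m % 2 = 0 := by omega
        have hge : 2 ≤ m := by omega
        rw [if_neg (by omega), if_neg hz]
        conv_rhs => rw [lowAxisLoop]
        rw [dif_pos ⟨by omega, by omega⟩, show (m.toNat/2) = (m/2).toNat by omega,
          show (0:Int)+1 = 0+1 by ring, lowAxis_shift]
    · -- odd: loop stops at 0, m odd hence lowAxisLoop returns 0
      conv_lhs => rw [findAxis]
      rw [dif_neg (by rintro ⟨-, hb⟩; rw [hband, hpd] at hb; exact one_ne_zero hb)]
      have hmz : m ≠ 0 := by omega
      rw [if_neg hmz]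
      conv_rhs => rw [lowAxisLoop]
      rw [dif_neg (by rintro ⟨hb, -⟩; omega)]
theorem tbSucc_xor (a b i : Nat) : (a ^^^ b).testBit (i+1) = ((a/2) ^^^ (b/2)).testBit i := by
  rw [Nat.testBit_xor, Nat.testBit_add_one, Nat.testBit_add_one, Nat.testBit_xor]
theorem tbSucc_and (a b i : Nat) : (a &&& b).testBit (i+1) = ((a/2) &&& (b/2)).testBit i := by
  rw [Nat.testBit_and, Nat.testBit_add_one, Nat.testBit_add_one, Nat.testBit_and]

theorem xorD (a b : Nat) : (2*a) ^^^ (2*b) = 2*(a^^^b) := by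
  apply Nat.eq_of_testBit_eq; intro i
  cases i with
  | zero => simp [Nat.testBit_zero, Nat.mul_mod_right]
  | succ i => rw [tbSucc_xor, show 2*a/2 = a by omega, show 2*b/2 = b by omega,
      Nat.testBit_add_one, show 2*(a^^^b)/2 = a^^^b by omega]
theorem xorD1 (a b : Nat) : (2*a+1) ^^^ (2*b) = 2*(a^^^b)+1 := by
  apply Nat.eq_of_testBit_eq; intro i
  cases i with
  | zero => simp [Nat.testBit_zero]
  | succ i => rw [tbSucc_xor, show (2*a+1)/2 = a by omega, show 2*b/2 = b by omega,
      Nat.testBit_add_one, show (2*(a^^^b)+1)/2 = a^^^b by omega]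
theorem andD1 (a b : Nat) : (2*a+1) &&& (2*b) = 2*(a&&&b) := by
  apply Nat.eq_of_testBit_eq; intro i
  cases i with
  | zero => simp [Nat.testBit_zero, Nat.mul_mod_right]
  | succ i => rw [tbSucc_and, show (2*a+1)/2 = a by omega, show 2*b/2 = b by omega,
      Nat.testBit_add_one, show 2*(a&&&b)/2 = a&&&b by omega]
theorem andD0 (a b : Nat) : (2*a) &&& (2*b+1) = 2*(a&&&b) := by
  apply Nat.eq_of_testBit_eq; intro i
  cases i with
  | zero => simp [Nat.testBit_zero, Nat.mul_mod_right]
  | succ i => rw [tbSucc_and, show (2*a)/2 = a by omega, show (2*b+1)/2 = b by omega,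
      Nat.testBit_add_one, show 2*(a&&&b)/2 = a&&&b by omega]

theorem xor_cancel_right (x y z : Nat) (h : x ^^^ z = y ^^^ z) : x = y := by
  have := congrArg (· ^^^ z) h
  simpa [Nat.xor_assoc] using this

theorem grayStep (m : Nat) :
    (m ^^^ (m >>> 1)) ^^^ ((m+1) ^^^ ((m+1) &&& m)) = (m+1) ^^^ ((m+1) >>> 1) := by
  induction m using Nat.strong_induction_on with
  | _ m ih =>
    rcases Nat.even_or_odd m with he | ho
    · obtain ⟨j, hj⟩ := he
      have hm : m = 2*j := by omega
      subst hm
      rw [Nat.shiftRight_one, Nat.shiftRight_one, show 2*j/2 = j by omega,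
        show (2*j+1)/2 = j by omega,
        show (2*j+1) &&& (2*j) = 2*(j&&&j) from andD1 j j, Nat.and_self]
      simp [Nat.xor_comm, Nat.xor_left_comm]
    · obtain ⟨j, hj⟩ := ho
      subst hj
      have ihj := ih j (by omega)
      rw [Nat.shiftRight_one, Nat.shiftRight_one] at ihj ⊢
      rw [show (2*j+1)/2 = j by omega, show (2*j+1+1)/2 = j+1 by omega,
        show 2*j+1+1 = 2*(j+1) by ring,
        show (2*(j+1)) &&& (2*j+1) = 2*((j+1)&&&j) from andD0 (j+1) j]
      have h2 : (2*j ^^^ 2*(j/2)) ^^^ (2*(j+1) ^^^ 2*((j+1)&&&j))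
          = 2*(j+1) ^^^ 2*((j+1)/2) := by
        rw [xorD, xorD, xorD, ihj]; exact (xorD _ _).symm
      apply xor_cancel_right _ _ ((2*j ^^^ 2*(j/2)) ^^^ (2*(j+1) ^^^ 2*((j+1)&&&j)))
      conv_rhs => rw [h2]
      -- cancel the &&& term on the left by AC, then residual
      simp only [Nat.xor_assoc]
      simp [Nat.xor_comm, Nat.xor_left_comm]
      have h3 : (2*j) ^^^ (2*j+1) = 1 := by
        rw [Nat.xor_comm, xorD1]; simp
      have lb : ∀ n : Nat, n ^^^ 2*(n/2) = n % 2 := by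
        intro n
        rcases Nat.even_or_odd n with hne | hno
        · obtain ⟨i, hi⟩ := hne
          have hn2 : n = 2*i := by omega
          subst hn2
          rw [show 2*i/2 = i by omega]
          simp [Nat.mul_mod_right]
        · obtain ⟨i, hi⟩ := hno
          subst hi
          rw [show (2*i+1)/2 = i by omega, xorD1]
          simp
      have hL : j ^^^ (2*j ^^^ (2*j+1 ^^^ 2*(j/2))) = (2*j ^^^ (2*j+1)) ^^^ (j ^^^ 2*(j/2)) := by
        simp [Nat.xor_comm, Nat.xor_left_comm]
      rw [hL, h3, lb j, lb (j+1)]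
      rcases Nat.even_or_odd j with hje | hjo
      · have hj0 := Nat.even_iff.mp hje
        rw [show j % 2 = 0 from hj0, show (j+1) % 2 = 1 by omega]
        decide
      · have hj1 := Nat.odd_iff.mp hjo
        rw [show j % 2 = 1 from hj1, show (j+1) % 2 = 0 by omega]
        decide


theorem fold_eq (path : List Int) (K : Nat) (hlen : path.length ≤ 2 ^ K) :
    ∀ n', n' ≤ path.length →
    (List.range n').foldl
      (fun (st : (List Int × List Int) × Int) (i : Nat) =>
        let w : Int := (i : Int)
        ((st.1.1 ++ [PySem.Int.bxor (rotlBits st.2 1 (K:Int)) (PySem.List.pyGetD path w 0)],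
          if w < (path.length:Int) - 1 then
            st.1.2 ++ [if PySem.Int.mod (PySem.Int.bxor (PySem.List.pyGetD path w 0) (PySem.List.pyGetD path (w+1) 0)) ((1:Int) <<< ((K:Int)).toNat) = 0 then (K:Int)
              else lowAxisLoop (PySem.Int.mod (PySem.Int.bxor (PySem.List.pyGetD path w 0) (PySem.List.pyGetD path (w+1) 0)) ((1:Int) <<< ((K:Int)).toNat)).toNat 0]
          else st.1.2),
         PySem.Int.bxor st.2 (PySem.Int.bxor (w+1) (PySem.Int.band (w+1) ((w+1) - 1))))) (([], []), 0)
    = ((List.range n').foldl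
        (fun (st : List Int × List Int) (i : Nat) =>
          let w : Int := (i : Int)
          (st.1 ++ [PySem.Int.bxor (PySem.List.pyGetD (computeBrgcSequence (K:Int)).1 w 0) (PySem.List.pyGetD path w 0)],
           if w < (path.length:Int) - 1 then
             st.2 ++ [findAxis (PySem.Int.bxor (PySem.List.pyGetD path w 0) (PySem.List.pyGetD path (w+1) 0)) (K:Int) 0]
           else st.2)) ([], []),
       ((n' ^^^ (n' >>> 1) : Nat) : Int)) := by
  intro n'
  induction n' with
  | zero => simp
  | succ n' ih =>
    intro hn
    have hn' : n' ≤ path.length := by omega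
    rw [List.range_succ, List.foldl_append, List.foldl_append, ih hn']
    simp only [List.foldl_cons, List.foldl_nil]
    refine Prod.ext (Prod.ext ?_ ?_) ?_
    · -- entry component
      simp only []
      rw [h_table (K:Int) n' (by simp; omega), grayCast]
    · -- direction component
      simp only []
      rw [Int.toNat_natCast, ← axis_eq K]
    · -- gray accumulator
      simp only []
      rw [show ((n':Int) + 1) = ((n'+1 : Nat) : Int) by push_cast; ring,
        show ((n'+1 : Nat) : Int) - 1 = ((n' : Nat) : Int) by push_cast; ring,
        PySem.Int.band_natCast, PySem.Int.bxor_natCast, PySem.Int.bxor_natCast, grayStep]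

theorem main_eq (path : List Int) (k : Int) (hk : 0 ≤ k) (hlen : path.length ≤ 2 ^ k.toNat) :
    analyze_path path k = analyze_path_alt path k := by
  obtain ⟨K, rfl⟩ : ∃ K : Nat, k = (K:Int) := ⟨k.toNat, (Int.toNat_of_nonneg hk).symm⟩
  have hlen' : path.length ≤ 2 ^ K := by simpa using hlen
  have h := fold_eq path K hlen' path.length le_rfl
  simp only [analyze_path, analyze_path_alt]
  rw [PySem.List.pyRange_zero_natCast path.length, List.foldl_map, List.foldl_map]
  exact (congrArg Prod.fst h).symm

-- ===== VERDICT (by name: the statement is the Claim_ definition above) =====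
theorem analyze_path_spec : Claim_equal_analyze_path := by
  unfold Claim_equal_analyze_path
  intro path k _ hpre
  unfold Spec_analyze_path
  exact main_eq path k hpre.1 hpre.2
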